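-- pv_equiv track=rewrite | github.com/sukria/koan | koan/app/mcp_servers.py | _parse_mcp_list
-- ===== SOURCE A (Python) =====
-- from typing import Dict, List, Optional
--
-- def _parse_mcp_list(output: str) -> List[Dict[str, str]]:
--     """Parse the output of `claude mcp list`.
--
--     The output format is typically:
--     - name: server-name
--       Type: stdio|http|sse
--       Status: connected|disconnected
--       ...
--
--     Or tabular format. We handle both.
--     """
--     servers = []
--     current: Dict[str, str] = {}
--
--     for line in output.splitlines():
--         line = line.strip()
--         if not line:
--             if current:
--                 servers.append(current)
--                 current = {}
--             continue
--
--         # Handle "- name: value" format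
--         if line.startswith("- "):
--             if current:
--                 servers.append(current)
--             current = {"name": line[2:].strip().rstrip(":")}
--             # Check if it's "- name: value" on same line
--             if ":" in line[2:]:
--                 parts = line[2:].split(":", 1)
--                 current = {"name": parts[1].strip()}
--             continue
--
--         # Handle "Key: value" lines within a server block
--         if ":" in line and current:
--             key, _, value = line.partition(":")
--             key = key.strip().lower()
--             value = value.strip()
--             if key in ("type", "transport"):
--                 current["type"] = value
--             elif key == "status":
--                 current["status"] = value
--             elif key == "command" or key == "url":
--                 current["command"] = value
--
--     if current:
--         servers.append(current)
--
--     return servers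
-- ===== SOURCE B (Python) =====
-- from typing import Dict, List
--
--
-- def _parse_block(block: List[str]) -> Dict[str, str]:
--     """Parse one collected block: header line then Key: value lines."""
--     head = block[0][2:]
--     if ":" in head:
--         name = head.split(":", 1)[1].strip()
--     else:
--         name = head.strip()
--     server = {"name": name}
--     for line in block[1:]:
--         if ":" in line:
--             key, _, value = line.partition(":")
--             key = key.strip().lower()
--             value = value.strip()
--             if key in ("type", "transport"):
--                 server["type"] = value
--             elif key == "status":
--                 server["status"] = value
--             elif key in ("command", "url"):
--                 server["command"] = value
--     return server
--
--
-- def _parse_mcp_list(output: str) -> List[Dict[str, str]]: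
--     # Pass 1: group stripped lines into blocks opened by '- ' headers.
--     blocks: List[List[str]] = []
--     cur = None
--     for raw in output.splitlines():
--         line = raw.strip()
--         if line.startswith("- "):
--             if cur is not None:
--                 blocks.append(cur)
--             cur = [line]
--         elif not line:
--             if cur is not None:
--                 blocks.append(cur)
--             cur = None
--         elif cur is not None:
--             cur.append(line)
--     if cur is not None:
--         blocks.append(cur)
--     # Pass 2: parse each block independently.
--     return [_parse_block(b) for b in blocks]
-- ===== Notes on version B (the rewrite author's own statement) =====
-- stated objective: simpler
-- what changed: Replaces A's single stateful loop that flushes a mutable dict at three different places by a two-pass decomposition: a grouping pass collecting stripped lines into blocks opened by '- ' headers, then an independent per-block parsing pass building each server dict.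
import Mathlib
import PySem

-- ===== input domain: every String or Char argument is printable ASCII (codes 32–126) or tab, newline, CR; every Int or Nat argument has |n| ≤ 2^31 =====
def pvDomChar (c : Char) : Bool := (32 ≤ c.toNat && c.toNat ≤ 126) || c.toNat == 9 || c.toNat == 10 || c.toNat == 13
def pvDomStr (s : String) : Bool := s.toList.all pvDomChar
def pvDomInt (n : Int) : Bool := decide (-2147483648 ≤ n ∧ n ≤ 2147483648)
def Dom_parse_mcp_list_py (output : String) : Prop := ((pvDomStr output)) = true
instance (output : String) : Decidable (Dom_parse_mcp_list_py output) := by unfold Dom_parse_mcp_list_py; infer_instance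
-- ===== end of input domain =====

-- B replaces A's single stateful dict-building loop by a grouping pass into blocks
-- followed by an independent per-block parsing pass (objective: simpler decomposition).


-- ===== PORT A =====
-- port of s.rstrip(":") for the single strip char ':' (exact: removes all trailing ':')
def pvRstripColon (cs : List Char) : List Char :=
  (cs.reverse.dropWhile (· == ':')).reverse

-- the "Key: value" mapping shared verbatim by both Python sources.
-- line.partition(":") / line.split(":", 1) are ported as take/drop at the first ':'
-- (exact for the one-char separator: before-first-colon, and after it — [] when absent).
def pvApplyKV (d : PySem.Dict String String) (line : List Char) : PySem.Dict String String :=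
  let key := PySem.Chars.lower (PySem.Chars.strip (line.takeWhile (· ≠ ':')))
  let value := String.ofList (PySem.Chars.strip ((line.dropWhile (· ≠ ':')).drop 1))
  if key = "type".toList ∨ key = "transport".toList then d.insert "type" value
  else if key = "status".toList then d.insert "status" value
  else if key = "command".toList ∨ key = "url".toList then d.insert "command" value
  else d

-- one iteration of A's loop; state = (servers, current)  (line[2:] = drop 2, exact)
def pvAStep (st : List (PySem.Dict String String) × PySem.Dict String String)
    (raw : List Char) : List (PySem.Dict String String) × PySem.Dict String String :=
  let line := PySem.Chars.strip raw
  if line = [] then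
    if st.2.items.isEmpty then st else (st.1 ++ [st.2], PySem.Dict.empty)
  else if PySem.Chars.startswith line ['-', ' '] then
    let servers := if st.2.items.isEmpty then st.1 else st.1 ++ [st.2]
    let r := line.drop 2
    let cur1 := (PySem.Dict.empty : PySem.Dict String String).insert "name"
      (String.ofList (pvRstripColon (PySem.Chars.strip r)))
    let cur := if PySem.Chars.isIn [':'] r then
        (PySem.Dict.empty : PySem.Dict String String).insert "name"
          (String.ofList (PySem.Chars.strip ((r.dropWhile (· ≠ ':')).drop 1)))
      else cur1
    (servers, cur)
  else if PySem.Chars.isIn [':'] line && !st.2.items.isEmpty then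
    (st.1, pvApplyKV st.2 line)
  else st

def parse_mcp_list_py (output : String) : List (List (String × String)) :=
  let fin := (PySem.Chars.splitlines output.toList).foldl pvAStep ([], PySem.Dict.empty)
  let servers := if fin.2.items.isEmpty then fin.1 else fin.1 ++ [fin.2]
  servers.map (·.items)

-- ===== PORT B =====
-- grouping pass: state = (blocks, current open block or none)
def pvGroupStep (st : List (List (List Char)) × Option (List (List Char)))
    (raw : List Char) : List (List (List Char)) × Option (List (List Char)) :=
  let line := PySem.Chars.strip raw
  if PySem.Chars.startswith line ['-', ' '] then
    ((match st.2 with | some b => st.1 ++ [b] | none => st.1), some [line])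
  else if line = [] then
    ((match st.2 with | some b => st.1 ++ [b] | none => st.1), none)
  else
    match st.2 with
    | some b => (st.1, some (b ++ [line]))
    | none => st

-- Source B's _parse_block (head[2:] = drop 2; split(":",1)[1] = after first ':');
-- the [] case is unreachable (grouped blocks always carry their header line)
def pvBlockDict (b : List (List Char)) : PySem.Dict String String :=
  match b with
  | [] => PySem.Dict.empty
  | h :: t =>
    let r := h.drop 2
    let name := if PySem.Chars.isIn [':'] r then
        PySem.Chars.strip ((r.dropWhile (· ≠ ':')).drop 1)
      else PySem.Chars.strip r
    t.foldl (fun d l => if PySem.Chars.isIn [':'] l then pvApplyKV d l else d)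
      ((PySem.Dict.empty : PySem.Dict String String).insert "name" (String.ofList name))

def parse_mcp_list_py_alt (output : String) : List (List (String × String)) :=
  let fin := (PySem.Chars.splitlines output.toList).foldl pvGroupStep ([], none)
  let blocks := match fin.2 with | some b => fin.1 ++ [b] | none => fin.1
  blocks.map (fun b => (pvBlockDict b).items)

-- ===== PRECONDITION & SPEC =====
def Spec_parse_mcp_list_py (output : String) (out : List (List (String × String))) : Prop := out = parse_mcp_list_py_alt output
instance (output : String) (out : List (List (String × String))) : Decidable (Spec_parse_mcp_list_py output out) := by unfold Spec_parse_mcp_list_py; infer_instance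

-- ===== CLAIM (what is proved, stated in full; the proofs are below) =====
def Claim_equal_parse_mcp_list_py : Prop := ∀ (output : String), Dom_parse_mcp_list_py output → Spec_parse_mcp_list_py output (parse_mcp_list_py output)

-- ===== LEMMAS AND PROOFS =====

lemma pv_insert_items_ne_nil (d : PySem.Dict String String) (k v : String) :
    (d.insert k v).items ≠ [] := by
  have h := PySem.Dict.mem_items_insert_self (d := d) (k := k) (v := v)
  intro hnil
  rw [hnil] at h
  exact (List.not_mem_nil) h

lemma pv_applyKV_items_ne_nil (d : PySem.Dict String String) (l : List Char)
    (h : d.items ≠ []) : (pvApplyKV d l).items ≠ [] := by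
  unfold pvApplyKV
  dsimp only
  split_ifs <;> first
    | exact pv_insert_items_ne_nil _ _ _
    | exact h

lemma pv_strip_sublist (s : List Char) : List.Sublist (PySem.Chars.strip s) s := by
  unfold PySem.Chars.strip PySem.Chars.rstrip PySem.Chars.lstrip
  refine List.Sublist.trans ?_ (List.dropWhile_sublist (p := PySem.Chars.isspace) (l := s))
  have h1 := List.dropWhile_sublist (p := PySem.Chars.isspace)
    (l := (List.dropWhile PySem.Chars.isspace s).reverse)
  simpa using h1.reverse

lemma pv_rstripColon_of_not_mem (cs : List Char) (h : ':' ∉ cs) :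
    pvRstripColon cs = cs := by
  unfold pvRstripColon
  rw [List.dropWhile_eq_self_iff.2]
  · simp
  · intro hx
    have hm : cs.reverse[0] ∈ cs.reverse := List.getElem_mem _
    simp only [List.mem_reverse] at hm
    simp only [beq_iff_eq]
    intro he
    exact h (he ▸ hm)

lemma pv_not_mem_of_isIn_false (c : Char) (r : List Char)
    (h : PySem.Chars.isIn [c] r = false) : c ∉ r := by
  intro hm
  rw [PySem.Chars.isIn_eq_false_iff] at h
  obtain ⟨a, b, rfl⟩ := List.append_of_mem hm
  exact h ⟨a, b, by simp⟩

lemma pv_startswith_nil : PySem.Chars.startswith ([] : List Char) ['-', ' '] = false := by decide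

lemma pvAStep_blank (sa : List (PySem.Dict String String) × PySem.Dict String String)
    (raw : List Char) (h : PySem.Chars.strip raw = []) :
    pvAStep sa raw = if sa.2.items.isEmpty then sa else (sa.1 ++ [sa.2], PySem.Dict.empty) := by
  simp [pvAStep, h]

lemma pvGroupStep_blank (st : List (List (List Char)) × Option (List (List Char)))
    (raw : List Char) (h : PySem.Chars.strip raw = []) :
    pvGroupStep st raw = ((match st.2 with | some b => st.1 ++ [b] | none => st.1), none) := by
  simp [pvGroupStep, h, pv_startswith_nil]

lemma pvAStep_header (sa : List (PySem.Dict String String) × PySem.Dict String String)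
    (raw : List Char) (h : PySem.Chars.startswith (PySem.Chars.strip raw) ['-', ' '] = true) :
    pvAStep sa raw = ((if sa.2.items.isEmpty then sa.1 else sa.1 ++ [sa.2]),
      pvBlockDict [PySem.Chars.strip raw]) := by
  have hne : PySem.Chars.strip raw ≠ [] := by
    intro he; rw [he, pv_startswith_nil] at h; exact Bool.false_ne_true h
  simp only [pvAStep, pvBlockDict, if_neg hne, if_pos h, List.foldl_nil]
  by_cases hc : PySem.Chars.isIn [':'] ((PySem.Chars.strip raw).drop 2) = true
  · simp [hc]
  · simp only [Bool.not_eq_true] at hc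
    have hnm : ':' ∉ (PySem.Chars.strip raw).drop 2 := pv_not_mem_of_isIn_false _ _ hc
    have hnm2 : ':' ∉ PySem.Chars.strip ((PySem.Chars.strip raw).drop 2) := fun hm =>
      hnm ((pv_strip_sublist _).mem hm)
    simp [hc, pv_rstripColon_of_not_mem _ hnm2]

lemma pvGroupStep_header (st : List (List (List Char)) × Option (List (List Char)))
    (raw : List Char) (h : PySem.Chars.startswith (PySem.Chars.strip raw) ['-', ' '] = true) :
    pvGroupStep st raw = ((match st.2 with | some b => st.1 ++ [b] | none => st.1),
      some [PySem.Chars.strip raw]) := by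
  simp [pvGroupStep, h]

lemma pvAStep_other (sa : List (PySem.Dict String String) × PySem.Dict String String)
    (raw : List Char) (h1 : PySem.Chars.strip raw ≠ [])
    (h2 : PySem.Chars.startswith (PySem.Chars.strip raw) ['-', ' '] = false) :
    pvAStep sa raw = if PySem.Chars.isIn [':'] (PySem.Chars.strip raw) && !sa.2.items.isEmpty
      then (sa.1, pvApplyKV sa.2 (PySem.Chars.strip raw)) else sa := by
  simp [pvAStep, h1, h2]

lemma pvGroupStep_other (st : List (List (List Char)) × Option (List (List Char)))
    (raw : List Char) (h1 : PySem.Chars.strip raw ≠ [])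
    (h2 : PySem.Chars.startswith (PySem.Chars.strip raw) ['-', ' '] = false) :
    pvGroupStep st raw = match st.2 with
      | some b => (st.1, some (b ++ [PySem.Chars.strip raw]))
      | none => st := by
  cases hcur : st.2 <;> simp [pvGroupStep, h1, h2, hcur]

lemma pvBlockDict_snoc (h : List Char) (t : List (List Char)) (line : List Char) :
    pvBlockDict ((h :: t) ++ [line]) =
      if PySem.Chars.isIn [':'] line then pvApplyKV (pvBlockDict (h :: t)) line
      else pvBlockDict (h :: t) := by
  simp only [pvBlockDict, List.cons_append, List.foldl_append, List.foldl_cons, List.foldl_nil]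

lemma pvBlockDict_ne_nil_of_items (b : List (List Char)) (h : (pvBlockDict b).items ≠ []) :
    b ≠ [] := by
  intro he
  rw [he] at h
  simp [pvBlockDict, PySem.Dict.empty] at h

-- the invariant relating A's fold state to B's fold state, pushed through the rest of the lines
lemma pv_main (raws : List (List Char)) (sa : List (PySem.Dict String String) × PySem.Dict String String)
    (blocks : List (List (List Char))) (cur : Option (List (List Char)))
    (h1 : sa.1 = blocks.map pvBlockDict)
    (h2 : match cur with
          | none => sa.2 = PySem.Dict.empty
          | some b => sa.2 = pvBlockDict b ∧ (pvBlockDict b).items ≠ []) :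
    (let fa := raws.foldl pvAStep sa
     let fb := raws.foldl pvGroupStep (blocks, cur)
     (if fa.2.items.isEmpty then fa.1 else fa.1 ++ [fa.2]) =
       (match fb.2 with | some b => fb.1 ++ [b] | none => fb.1).map pvBlockDict) := by
  induction raws generalizing sa blocks cur with
  | nil =>
    dsimp only [List.foldl_nil]
    cases cur with
    | none =>
      have hempty : sa.2.items.isEmpty = true := by rw [h2]; simp [PySem.Dict.empty]
      rw [if_pos hempty]; exact h1
    | some b =>
      obtain ⟨hb, hne⟩ := h2
      rw [if_neg (by simp [hb, hne]), h1, hb,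
        List.map_append, List.map_cons, List.map_nil]
  | cons raw raws ih =>
    simp only [List.foldl_cons]
    by_cases hblank : PySem.Chars.strip raw = []
    · cases cur with
      | none =>
        have hempty : sa.2.items.isEmpty = true := by rw [h2]; simp [PySem.Dict.empty]
        have ha : pvAStep sa raw = sa := by
          rw [pvAStep_blank sa raw hblank, if_pos hempty]
        have hg : pvGroupStep (blocks, none) raw = (blocks, none) := by
          rw [pvGroupStep_blank (blocks, none) raw hblank]
        rw [ha, hg]
        exact ih sa blocks none h1 h2
      | some b =>
        obtain ⟨hb, hne⟩ := h2
        have hnotE : sa.2.items.isEmpty = false := by simp [hb, hne]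
        have ha : pvAStep sa raw = (sa.1 ++ [sa.2], PySem.Dict.empty) := by
          rw [pvAStep_blank sa raw hblank, if_neg (by simp [hnotE])]
        have hg : pvGroupStep (blocks, some b) raw = (blocks ++ [b], none) := by
          rw [pvGroupStep_blank (blocks, some b) raw hblank]
        rw [ha, hg]
        exact ih _ (blocks ++ [b]) none (by simp [h1, hb]) rfl
    · by_cases hsw : PySem.Chars.startswith (PySem.Chars.strip raw) ['-', ' '] = true
      · have hnn : (pvBlockDict [PySem.Chars.strip raw]).items ≠ [] := by
          simp only [pvBlockDict, List.foldl_nil]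
          exact pv_insert_items_ne_nil _ _ _
        cases cur with
        | none =>
          have hempty : sa.2.items.isEmpty = true := by rw [h2]; simp [PySem.Dict.empty]
          have ha : pvAStep sa raw = (sa.1, pvBlockDict [PySem.Chars.strip raw]) := by
            rw [pvAStep_header sa raw hsw, if_pos hempty]
          have hg : pvGroupStep (blocks, none) raw = (blocks, some [PySem.Chars.strip raw]) := by
            rw [pvGroupStep_header (blocks, none) raw hsw]
          rw [ha, hg]
          exact ih _ blocks (some [PySem.Chars.strip raw]) h1 ⟨rfl, hnn⟩
        | some b =>
          obtain ⟨hb, hne⟩ := h2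
          have hnotE : sa.2.items.isEmpty = false := by simp [hb, hne]
          have ha : pvAStep sa raw = (sa.1 ++ [sa.2], pvBlockDict [PySem.Chars.strip raw]) := by
            rw [pvAStep_header sa raw hsw, if_neg (by simp [hnotE])]
          have hg : pvGroupStep (blocks, some b) raw
              = (blocks ++ [b], some [PySem.Chars.strip raw]) := by
            rw [pvGroupStep_header (blocks, some b) raw hsw]
          rw [ha, hg]
          exact ih _ (blocks ++ [b]) (some [PySem.Chars.strip raw])
            (by simp [h1, hb]) ⟨rfl, hnn⟩
      · rw [Bool.not_eq_true] at hsw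
        cases cur with
        | none =>
          have hempty : sa.2.items.isEmpty = true := by rw [h2]; simp [PySem.Dict.empty]
          have ha : pvAStep sa raw = sa := by
            rw [pvAStep_other sa raw hblank hsw, if_neg (by simp [hempty])]
          have hg : pvGroupStep (blocks, none) raw = (blocks, none) := by
            rw [pvGroupStep_other (blocks, none) raw hblank hsw]
          rw [ha, hg]
          exact ih sa blocks none h1 h2
        | some b =>
          obtain ⟨hb, hne⟩ := h2
          obtain ⟨bh, bt, rfl⟩ := List.exists_cons_of_ne_nil (pvBlockDict_ne_nil_of_items b hne)
          have hnotE : sa.2.items.isEmpty = false := by simp [hb, hne]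
          have hg : pvGroupStep (blocks, some (bh :: bt)) raw
              = (blocks, some ((bh :: bt) ++ [PySem.Chars.strip raw])) := by
            rw [pvGroupStep_other (blocks, some (bh :: bt)) raw hblank hsw]
          have hdict : pvBlockDict ((bh :: bt) ++ [PySem.Chars.strip raw])
              = if PySem.Chars.isIn [':'] (PySem.Chars.strip raw)
                then pvApplyKV (pvBlockDict (bh :: bt)) (PySem.Chars.strip raw)
                else pvBlockDict (bh :: bt) := pvBlockDict_snoc bh bt _
          by_cases hc : PySem.Chars.isIn [':'] (PySem.Chars.strip raw) = true
          · have ha : pvAStep sa raw = (sa.1, pvApplyKV sa.2 (PySem.Chars.strip raw)) := by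
              rw [pvAStep_other sa raw hblank hsw, if_pos (by simp [hc, hnotE])]
            rw [ha, hg]
            refine ih _ blocks (some ((bh :: bt) ++ [PySem.Chars.strip raw])) h1 ⟨?_, ?_⟩
            · rw [hdict, if_pos hc, hb]
            · rw [hdict, if_pos hc]
              exact pv_applyKV_items_ne_nil _ _ hne
          · rw [Bool.not_eq_true] at hc
            have ha : pvAStep sa raw = sa := by
              rw [pvAStep_other sa raw hblank hsw, if_neg (by simp [hc])]
            rw [ha, hg]
            refine ih _ blocks (some ((bh :: bt) ++ [PySem.Chars.strip raw])) h1 ⟨?_, ?_⟩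
            · rw [hdict, if_neg (by simp [hc]), hb]
            · rw [hdict, if_neg (by simp [hc])]
              exact hne

-- ===== VERDICT (by name: the statement is the Claim_ definition above) =====
theorem parse_mcp_list_py_spec : Claim_equal_parse_mcp_list_py := by
  intro output _
  unfold Spec_parse_mcp_list_py parse_mcp_list_py parse_mcp_list_py_alt
  have := pv_main (PySem.Chars.splitlines output.toList) ([], PySem.Dict.empty) [] none rfl rfl
  simp only at this
  simp only [this, List.map_map]
  rfl
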